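-- pv_equiv track=rewrite | github.com/tbarlow12/Learn-It-Your-Way | server/data_tools/csv_tools.py | is_categorical
-- ===== SOURCE A (Python) =====
-- categorical_limit = 2
--
-- def is_categorical(lines):
--     categorical = []
--     all_distinct_vals = []
--     for i in range(0,len(lines[0])):
--         distinct_vals = set([line[i] for line in lines])
--         all_distinct_vals.append(distinct_vals)
--         if len(distinct_vals) <= categorical_limit:
--             categorical.append(1)
--         else:
--             categorical.append(0)
--     return categorical, all_distinct_vals
-- ===== SOURCE B (Python) =====
-- categorical_limit = 2
--
-- def _distinct_cols(lines, n):
--     # distinct values per column (first-occurrence order), divide and conquer over rows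
--     if len(lines) == 1:
--         return [dict.fromkeys([lines[0][i]]) for i in range(n)]
--     mid = len(lines) // 2
--     left = _distinct_cols(lines[:mid], n)
--     right = _distinct_cols(lines[mid:], n)
--     return [{**l, **r} for l, r in zip(left, right)]
--
-- def is_categorical(lines):
--     cols = _distinct_cols(lines, len(lines[0]))
--     categorical = [1 if len(d) <= categorical_limit else 0 for d in cols]
--     return categorical, [set(d) for d in cols]
-- ===== Notes on version B (the rewrite author's own statement) =====
-- stated objective: alternative
-- what changed: A scans the whole table once per column building each column's set directly; B computes the per-column distinct values by divide-and-conquer recursion over the rows, merging ordered dicts of the two halves column-wise, then derives the flags from the merged dicts.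
import Mathlib
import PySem

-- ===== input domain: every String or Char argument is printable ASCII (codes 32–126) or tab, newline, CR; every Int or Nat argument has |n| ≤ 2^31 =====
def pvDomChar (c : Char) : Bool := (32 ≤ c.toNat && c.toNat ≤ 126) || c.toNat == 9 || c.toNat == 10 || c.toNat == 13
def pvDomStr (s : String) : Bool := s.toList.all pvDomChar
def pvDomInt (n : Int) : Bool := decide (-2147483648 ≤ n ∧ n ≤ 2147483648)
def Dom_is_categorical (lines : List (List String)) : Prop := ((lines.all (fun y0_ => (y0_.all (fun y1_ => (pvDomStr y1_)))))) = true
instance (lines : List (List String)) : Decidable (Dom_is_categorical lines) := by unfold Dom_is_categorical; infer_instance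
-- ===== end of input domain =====

-- B replaces A's column-by-column whole-table scans with a divide-and-conquer
-- recursion over the rows, merging per-column ordered dicts; same results.

-- line[i] for a Nat index (exact under Pre_, where the index is in range)
def pvCell (line : List String) (i : Nat) : String :=
  (PySem.List.pyGet? line (Int.ofNat i)).getD ""

-- ===== PORT A =====
def is_categorical (lines : List (List String)) : List Int × List (List String) :=
  (List.range (lines.headD []).length).foldl
    (fun acc i =>
      let distinct_vals : PySem.Set String :=
        PySem.Set.ofList (lines.map (fun line => pvCell line i))
      (acc.1 ++ [if (distinct_vals.length : Int) ≤ 2 then (1 : Int) else 0],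
       acc.2 ++ [distinct_vals]))
    ([], [])

-- ===== PORT B =====
-- _distinct_cols: each ordered dict is represented by its key list (values are all
-- None and unused); {**l, **r} on the keys is PySem.Set.update l r.
-- (Python diverges on lines = []; that case is unreachable from is_categorical_alt
-- under Pre_, the [] branch is only a totality guard.)
def pvDistinctCols (n : Nat) (lines : List (List String)) : List (PySem.Set String) :=
  if lines.length ≤ 1 then
    (List.range n).map (fun i => PySem.List.dedup [pvCell (lines.headD []) i])
  else
    let mid := lines.length / 2
    let left := pvDistinctCols n (lines.take mid)
    let right := pvDistinctCols n (lines.drop mid)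
    (left.zip right).map (fun p => PySem.Set.update p.1 p.2)
termination_by lines.length
decreasing_by
  · simp only [List.length_take]; omega
  · simp only [List.length_drop]; omega

def is_categorical_alt (lines : List (List String)) : List Int × List (List String) :=
  let cols := pvDistinctCols (lines.headD []).length lines
  (cols.map (fun d => if (d.length : Int) ≤ 2 then (1 : Int) else 0),
   cols.map (fun d => PySem.Set.ofList d))

-- ===== PRECONDITION & SPEC =====
-- Pre_ excludes exactly the inputs where Python A raises IndexError: empty `lines`
-- (lines[0]) or a row shorter than the first row (line[i]); B raises there too.
def Pre_is_categorical (lines : List (List String)) : Prop :=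
  lines ≠ [] ∧ ∀ l ∈ lines, (lines.headD []).length ≤ l.length
instance (lines : List (List String)) : Decidable (Pre_is_categorical lines) := by
  unfold Pre_is_categorical; infer_instance
def pvWitness_is_categorical : List (List String) := [["a", "b"], ["a", "c"]]

def Spec_is_categorical (lines : List (List String)) (out : List Int × List (List String)) : Prop := out = is_categorical_alt lines
instance (lines : List (List String)) (out : List Int × List (List String)) : Decidable (Spec_is_categorical lines out) := by unfold Spec_is_categorical; infer_instance

-- ===== CLAIM =====
def Claim_equal_is_categorical : Prop := ∀ (lines : List (List String)), Dom_is_categorical lines → Pre_is_categorical lines → Spec_is_categorical lines (is_categorical lines)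

-- ===== LEMMAS AND PROOFS =====

-- A's loop: appending one flag and one set per column is the pair of maps over the columns.
theorem pv_foldl_pair_append (l : List Nat) (f : Nat → Int) (h : Nat → List String)
    (acc : List Int × List (List String)) :
    l.foldl (fun acc i => (acc.1 ++ [f i], acc.2 ++ [h i])) acc
      = (acc.1 ++ l.map f, acc.2 ++ l.map h) := by
  induction l generalizing acc with
  | nil => simp
  | cons x xs ih => simp [List.foldl_cons, ih]

-- updating with an already-deduplicated list is updating with the raw list
theorem pv_update_ofList (s : PySem.Set String) (ys : List String) :
    PySem.Set.update s (PySem.Set.ofList ys) = PySem.Set.update s ys := by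
  rw [PySem.Set.update_eq_append_filter, PySem.Set.update_eq_append_filter,
      PySem.Set.ofList_ofList]

-- B's divide-and-conquer computes, per column, the set of that column's values.
theorem pv_distinct_spec (n : Nat) (lines : List (List String)) (hne : lines ≠ []) :
    pvDistinctCols n lines
      = (List.range n).map
          (fun i => PySem.Set.ofList (lines.map (fun line => pvCell line i))) := by
  induction hlen : lines.length using Nat.strong_induction_on generalizing lines with
  | _ k ih =>
    rw [pvDistinctCols]
    by_cases h1 : lines.length ≤ 1
    · have : lines.length = 1 := by
        cases lines with
        | nil => exact absurd rfl hne
        | cons a t =>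
          simp only [List.length_cons] at h1 ⊢
          omega
      obtain ⟨a, ha⟩ : ∃ a, lines = [a] := by
        cases lines with
        | nil => exact absurd rfl hne
        | cons a t =>
          cases t with
          | nil => exact ⟨a, rfl⟩
          | cons b u => simp at this
      subst ha
      simp [PySem.List.dedup_eq_ofList]
    · simp only [h1, if_false]
      have hlen2 : 2 ≤ lines.length := by omega
      have hmid1 : 1 ≤ lines.length / 2 := by omega
      have hmidlt : lines.length / 2 < lines.length := by omega
      have htne : lines.take (lines.length / 2) ≠ [] := by
        intro h; have := congrArg List.length h
        simp only [List.length_take, List.length_nil] at this; omega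
      have hdne : lines.drop (lines.length / 2) ≠ [] := by
        intro h; have := congrArg List.length h
        simp only [List.length_drop, List.length_nil] at this; omega
      have hlt : (lines.take (lines.length / 2)).length < k := by
        simp only [List.length_take]; omega
      have hld : (lines.drop (lines.length / 2)).length < k := by
        simp only [List.length_drop]; omega
      rw [ih _ hlt _ htne rfl, ih _ hld _ hdne rfl]
      rw [List.zip_map', List.map_map]
      apply List.map_congr_left
      intro i _
      simp only [Function.comp]
      rw [pv_update_ofList, ← PySem.Set.ofList_append, ← List.map_append,
          List.take_append_drop]

-- ===== VERDICT =====
theorem is_categorical_spec : Claim_equal_is_categorical := by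
  intro lines _ hpre
  unfold Spec_is_categorical is_categorical is_categorical_alt
  rw [pv_distinct_spec _ _ hpre.1,
      pv_foldl_pair_append (List.range (lines.headD []).length)
        (fun i => if ((PySem.Set.ofList (lines.map (fun line => pvCell line i))).length : Int) ≤ 2 then (1 : Int) else 0)
        (fun i => PySem.Set.ofList (lines.map (fun line => pvCell line i)))]
  simp only [List.nil_append, List.map_map]
  apply Prod.ext <;> · apply List.map_congr_left; intro i _; simp [PySem.Set.ofList_ofList]
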